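-- pv_equiv track=rewrite | github.com/incnone/AdventOfCode | 2018/day2.py | part_1
-- ===== SOURCE A (Python) =====
-- from collections import Counter
--
-- def parse_input(s):
--     return list(s.splitlines(keepends=False))
--
-- def part_1(input_str):
--     num_2 = 0
--     num_3 = 0
--     for s in parse_input(input_str):
--         c = Counter(s)
--         num_2 += 1 if 2 in c.values() else 0
--         num_3 += 1 if 3 in c.values() else 0
--     return num_2*num_3
-- ===== SOURCE B (Python) =====
-- def part_1(input_str):
--     num_2 = 0
--     num_3 = 0
--     for line in input_str.splitlines():
--         # run-length scan of the sorted line: equal characters are adjacent,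
--         # so each maximal run's length is that character's multiplicity.
--         runs = set()
--         chars = sorted(line)
--         n = len(chars)
--         i = 0
--         while i < n:
--             j = i + 1
--             while j < n and chars[j] == chars[i]:
--                 j += 1
--             runs.add(j - i)
--             i = j
--         if 2 in runs:
--             num_2 += 1
--         if 3 in runs:
--             num_3 += 1
--     return num_2 * num_3
-- ===== Notes on version B (the rewrite author's own statement) =====
-- stated objective: alternative
-- what changed: Per line, B drops the Counter hash entirely: it sorts the line and does one run-length scan over the sorted characters (two-pointer while loop), collecting the set of run lengths and testing 2/3 membership there; correctness rests on equal characters being adjacent after sorting, so run lengths are exactly the multiplicities.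
import Mathlib
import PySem

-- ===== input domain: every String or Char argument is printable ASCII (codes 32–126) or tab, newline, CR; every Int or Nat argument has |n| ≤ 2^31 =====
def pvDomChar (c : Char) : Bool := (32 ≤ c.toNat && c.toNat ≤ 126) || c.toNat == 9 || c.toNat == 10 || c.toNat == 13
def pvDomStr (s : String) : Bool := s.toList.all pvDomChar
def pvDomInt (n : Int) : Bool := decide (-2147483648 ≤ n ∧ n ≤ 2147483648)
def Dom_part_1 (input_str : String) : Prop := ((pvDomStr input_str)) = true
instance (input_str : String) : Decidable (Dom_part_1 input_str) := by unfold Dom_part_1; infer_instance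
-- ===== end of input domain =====

-- B replaces the per-line Counter with a sort + run-length scan: after sorting, equal
-- characters are adjacent, so the set of run lengths is the set of multiplicities
-- (objective: alternative algorithm, no hash counting).

-- ===== PORT A =====
-- parse_input(s) = list(s.splitlines(keepends=False))
def parse_input (s : String) : List String := PySem.Str.splitlines s

def part_1 (input_str : String) : Int :=
  -- num_2 = 0; num_3 = 0; for s in parse_input(input_str): c = Counter(s); …
  let p : Int × Int :=
    (parse_input input_str).foldl
      (fun (acc : Int × Int) s =>
        let c := PySem.Dict.counter s.toList
        (acc.1 + (if (PySem.Dict.values c).contains (2 : Int) then 1 else 0),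
         acc.2 + (if (PySem.Dict.values c).contains (3 : Int) then 1 else 0)))
      (0, 0)
  p.1 * p.2

-- ===== PORT B =====
-- the outer 'while i < n' of Source B: the inner 'while j < n and chars[j] == chars[i]'
-- walks to the end of the run starting at i, i.e. the run is takeWhile (== chars[i])
-- of the remainder and the scan resumes at dropWhile (== chars[i]); runs.add(j - i).
def runsOf : List Char → PySem.Set Int → PySem.Set Int
  | [], runs => runs
  | c :: t, runs =>
      runsOf (t.dropWhile (fun x => x == c))
        (PySem.Set.add runs (1 + ((t.takeWhile (fun x => x == c)).length : Int)))
termination_by cs _ => cs.length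
decreasing_by simpa using Nat.lt_succ_of_le (List.length_dropWhile_le _ t)

def part_1_alt (input_str : String) : Int :=
  let p : Int × Int :=
    (PySem.Str.splitlines input_str).foldl
      (fun (acc : Int × Int) line =>
        let runs := runsOf (PySem.List.sorted line.toList (fun x => x) false) PySem.Set.empty
        (acc.1 + (if PySem.Set.contains runs (2 : Int) then 1 else 0),
         acc.2 + (if PySem.Set.contains runs (3 : Int) then 1 else 0)))
      (0, 0)
  p.1 * p.2

-- ===== PRECONDITION & SPEC =====
def Spec_part_1 (input_str : String) (out : Int) : Prop := out = part_1_alt input_str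
instance (input_str : String) (out : Int) : Decidable (Spec_part_1 input_str out) := by unfold Spec_part_1; infer_instance

-- ===== CLAIM (what is proved, stated in full; the proofs are below) =====
def Claim_equal_part_1 : Prop := ∀ (input_str : String), Dom_part_1 input_str → Spec_part_1 input_str (part_1 input_str)

-- ===== LEMMAS AND PROOFS =====

-- in a sorted list c :: t, no copy of c survives past the initial run
theorem not_mem_dropWhile_of_sorted (c : Char) (t : List Char)
    (h : (c :: t).Pairwise (· ≤ ·)) : c ∉ t.dropWhile (fun x => x == c) := by
  induction t with
  | nil => simp
  | cons d r ih =>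
    rcases List.pairwise_cons.mp h with ⟨hc, hdr⟩
    by_cases hd : (d == c) = true
    · have hdc : d = c := by simpa using hd
      subst hdc
      simp only [List.dropWhile_cons, hd, if_pos]
      exact ih hdr
    · simp only [List.dropWhile_cons, hd]
      intro hmem
      have hdc : d ≠ c := fun he => hd (by simp [he])
      rcases List.mem_cons.mp hmem with he | hr
      · exact hdc he.symm
      · rcases List.pairwise_cons.mp hdr with ⟨hdle, _⟩
        have h1 : c ≤ d := hc d (by simp)
        have h2 : d ≤ c := hdle c hr
        exact hdc (le_antisymm h2 h1)

-- the first run's length is the head's multiplicity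
theorem count_head_of_sorted (c : Char) (t : List Char)
    (h : (c :: t).Pairwise (· ≤ ·)) :
    (c :: t).count c = 1 + (t.takeWhile (fun x => x == c)).length := by
  have hsplit : t.count c
      = (t.takeWhile (fun x => x == c)).count c + (t.dropWhile (fun x => x == c)).count c := by
    conv_lhs => rw [← List.takeWhile_append_dropWhile (p := fun x => x == c) (l := t)]
    exact List.count_append ..
  have htw : (t.takeWhile (fun x => x == c)).count c
      = (t.takeWhile (fun x => x == c)).length := by
    rw [List.count_eq_length]
    intro b hb
    have hb' : b = c := by simpa using List.mem_takeWhile_imp hb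
    simp [hb']
  have htd : (t.dropWhile (fun x => x == c)).count c = 0 :=
    List.count_eq_zero.mpr (not_mem_dropWhile_of_sorted c t h)
  rw [List.count_cons_self, hsplit, htw, htd]
  omega

-- a character appearing after the first run has a multiplicity untouched by the run
theorem count_tail_of_sorted (c d : Char) (t : List Char)
    (h : (c :: t).Pairwise (· ≤ ·)) (hd : d ∈ t.dropWhile (fun x => x == c)) :
    (c :: t).count d = (t.dropWhile (fun x => x == c)).count d := by
  have hdc : d ≠ c := fun he => not_mem_dropWhile_of_sorted c t h (he ▸ hd)
  have hsplit : t.count d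
      = (t.takeWhile (fun x => x == c)).count d + (t.dropWhile (fun x => x == c)).count d := by
    conv_lhs => rw [← List.takeWhile_append_dropWhile (p := fun x => x == c) (l := t)]
    exact List.count_append ..
  have htw : (t.takeWhile (fun x => x == c)).count d = 0 := by
    rw [List.count_eq_zero]
    intro hmem
    have := List.mem_takeWhile_imp hmem
    exact hdc (by simpa using this)
  have hne : (c == d) = false := by simp [Ne.symm hdc]
  rw [List.count_cons, hsplit, htw, hne]
  simp

-- the run-length scan collects exactly the multiplicities of the sorted list
theorem mem_runsOf (m : List Char) (acc : PySem.Set Int) :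
    m.Pairwise (· ≤ ·) → ∀ (x : Int),
    (x ∈ runsOf m acc ↔ x ∈ acc ∨ ∃ c ∈ m, (m.count c : Int) = x) := by
  induction m, acc using runsOf.induct with
  | case1 runs => intro _ x; simp [runsOf]
  | case2 c t runs ih =>
    intro h x
    rcases List.pairwise_cons.mp h with ⟨_, ht⟩
    have htd : (t.dropWhile (fun x => x == c)).Pairwise (· ≤ ·) :=
      ht.sublist (List.dropWhile_sublist _)
    rw [runsOf, ih htd x, PySem.Set.mem_add]
    constructor
    · rintro (⟨hacc | hrun⟩ | ⟨d, hdmem, hdcnt⟩)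
      · exact Or.inl hacc
      · refine Or.inr ⟨c, List.mem_cons_self, ?_⟩
        rw [count_head_of_sorted c t h, hrun]; push_cast; ring
      · refine Or.inr ⟨d, List.mem_cons_of_mem c ((List.dropWhile_sublist _).mem hdmem), ?_⟩
        rw [count_tail_of_sorted c d t h hdmem, hdcnt]
    · rintro (hacc | ⟨a, hamem, hacnt⟩)
      · exact Or.inl (Or.inl hacc)
      · rcases List.mem_cons.mp hamem with he | hat
        · subst he
          refine Or.inl (Or.inr ?_)
          rw [← hacnt, count_head_of_sorted a t h]; push_cast; ring
        · by_cases haw : a ∈ t.takeWhile (fun x => x == c)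
          · have hac : a = c := by simpa using List.mem_takeWhile_imp haw
            subst hac
            refine Or.inl (Or.inr ?_)
            rw [← hacnt, count_head_of_sorted a t h]; push_cast; ring
          · have had : a ∈ t.dropWhile (fun x => x == c) := by
              rcases (List.mem_append.mp
                (by rw [List.takeWhile_append_dropWhile (p := fun x => x == c) (l := t)]
                    exact hat)) with h1 | h2
              · exact absurd h1 haw
              · exact h2
            refine Or.inr ⟨a, had, ?_⟩
            rw [← count_tail_of_sorted c a t h had, hacnt]

-- the per-line tests agree: 'k in Counter(s).values()' = 'k in run lengths of sorted(s)'
theorem perline (s : String) (k : Int) :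
    (PySem.Dict.values (PySem.Dict.counter s.toList)).contains k
      = PySem.Set.contains (runsOf (PySem.List.sorted s.toList (fun x => x) false) PySem.Set.empty) k := by
  let l := s.toList
  let m := PySem.List.sorted l (fun x => x) false
  have hm : m.Pairwise (· ≤ ·) := PySem.List.sorted_pairwise l (fun x => x)
  have hperm : m.Perm l := PySem.List.sorted_perm l (fun x => x) false
  rw [Bool.eq_iff_iff, List.contains_iff_mem]
  show k ∈ PySem.Dict.values (PySem.Dict.counter l) ↔ _
  rw [show PySem.Set.contains (runsOf m PySem.Set.empty) k = List.contains (runsOf m PySem.Set.empty) k from rfl,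
      List.contains_iff_mem, mem_runsOf m PySem.Set.empty hm k]
  simp only [PySem.Dict.values, PySem.Dict.items_counter, List.map_map]
  constructor
  · intro hmem
    rcases List.mem_map.mp hmem with ⟨d, hd, hcnt⟩
    refine Or.inr ⟨d, hperm.mem_iff.mpr ((PySem.Set.mem_ofList l d).mp hd), ?_⟩
    rw [hperm.count_eq]
    simpa using hcnt
  · rintro (hfalse | ⟨d, hd, hcnt⟩)
    · exact absurd hfalse (List.not_mem_nil)
    · refine List.mem_map.mpr ⟨d, (PySem.Set.mem_ofList l d).mpr (hperm.mem_iff.mp hd), ?_⟩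
      rw [hperm.count_eq] at hcnt
      simpa using hcnt

-- ===== VERDICT (by name: the statement is the Claim_ definition above) =====
theorem part_1_spec : Claim_equal_part_1 := by
  intro input_str _
  show part_1 input_str = part_1_alt input_str
  unfold part_1 part_1_alt parse_input
  simp only [perline]
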